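-- pv_equiv track=rewrite | github.com/synth-laboratories/synth-ai | synth_ai/sdk/optimization/internal/graph_optimization_converters.py | parse_sft_example
-- ===== SOURCE A (Python) =====
-- from typing import Any
--
-- def parse_sft_example(example: dict[str, Any]) -> tuple[str | None, str | None, str | None]:
--     """Extract system, user, assistant from messages array."""
--     messages = example.get("messages", [])
--     system = None
--     user = None
--     assistant = None
--
--     for msg in messages:
--         role = msg.get("role")
--         content = msg.get("content", "")
--         if role == "system":
--             system = content
--         elif role == "user":
--             user = content  # Take last user message
--         elif role == "assistant":
--             assistant = content  # Take last assistant message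
--
--     return system, user, assistant
-- ===== SOURCE B (Python) =====
-- def parse_sft_example(example):
--     """Extract system, user, assistant from messages array (last occurrence of each role)."""
--     messages = example.get("messages", [])
--     system = user = assistant = None
--     found_system = found_user = found_assistant = False
--     for msg in reversed(messages):
--         role = msg.get("role")
--         content = msg.get("content", "")
--         if role == "system" and not found_system:
--             system = content
--             found_system = True
--         elif role == "user" and not found_user:
--             user = content
--             found_user = True
--         elif role == "assistant" and not found_assistant:
--             assistant = content
--             found_assistant = True
--         if found_system and found_user and found_assistant:
--             break
--     return system, user, assistant
-- ===== Notes on version B (the rewrite author's own statement) =====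
-- stated objective: alternative
-- what changed: B scans the messages in reverse and captures the first occurrence of each role (with three found-flags, breaking early once all three are set), instead of A's forward loop that keeps overwriting each slot.
import Mathlib
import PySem

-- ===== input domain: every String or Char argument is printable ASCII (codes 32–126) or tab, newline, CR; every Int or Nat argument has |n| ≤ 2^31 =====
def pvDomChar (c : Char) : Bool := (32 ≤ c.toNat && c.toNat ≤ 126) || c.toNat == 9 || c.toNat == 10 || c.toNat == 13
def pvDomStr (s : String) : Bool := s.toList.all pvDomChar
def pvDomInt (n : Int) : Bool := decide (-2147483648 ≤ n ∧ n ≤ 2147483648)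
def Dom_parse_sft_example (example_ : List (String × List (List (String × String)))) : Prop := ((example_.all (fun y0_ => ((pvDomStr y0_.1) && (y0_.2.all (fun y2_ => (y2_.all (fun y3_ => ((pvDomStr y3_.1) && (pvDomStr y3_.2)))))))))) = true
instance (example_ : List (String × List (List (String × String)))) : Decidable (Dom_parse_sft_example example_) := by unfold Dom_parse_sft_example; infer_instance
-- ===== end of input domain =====

-- B scans the messages in reverse with found-flags and an early break, instead of A's
-- forward overwrite loop; same result, stated and proved equal below (objective: alternative).

-- ===== PORT A =====
-- one step of A's forward loop: overwrite the slot of the message's role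
def pvStepA (st : Option String × Option String × Option String)
    (msg : List (String × String)) : Option String × Option String × Option String :=
  let role := (PySem.Dict.mk msg).get? "role"
  let content := (PySem.Dict.mk msg).getD "content" ""
  if role == some "system" then (some content, st.2.1, st.2.2)
  else if role == some "user" then (st.1, some content, st.2.2)
  else if role == some "assistant" then (st.1, st.2.1, some content)
  else st

def parse_sft_example (example_ : List (String × List (List (String × String)))) :
    Option String × Option String × Option String :=
  let messages := (PySem.Dict.mk example_).getD "messages" []
  messages.foldl pvStepA (none, none, none)

-- ===== PORT B =====
-- B's loop over the reversed messages: state = (found_system, system, found_user, user,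
-- found_assistant, assistant); capture a role only the first time its flag is unset, and
-- break as soon as all three flags are set.
def pvGoB : List (List (String × String)) → Bool → Option String → Bool → Option String →
    Bool → Option String → Option String × Option String × Option String
  | [], _, s, _, u, _, a => (s, u, a)
  | msg :: rest, fs, s, fu, u, fa, a =>
    let role := (PySem.Dict.mk msg).get? "role"
    let content := (PySem.Dict.mk msg).getD "content" ""
    let st' : Bool × Option String × Bool × Option String × Bool × Option String :=
      if role == some "system" && !fs then (true, some content, fu, u, fa, a)
      else if role == some "user" && !fu then (fs, s, true, some content, fa, a)
      else if role == some "assistant" && !fa then (fs, s, fu, u, true, some content)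
      else (fs, s, fu, u, fa, a)
    if st'.1 && st'.2.2.1 && st'.2.2.2.2.1 then (st'.2.1, st'.2.2.2.1, st'.2.2.2.2.2)
    else pvGoB rest st'.1 st'.2.1 st'.2.2.1 st'.2.2.2.1 st'.2.2.2.2.1 st'.2.2.2.2.2

def parse_sft_example_alt (example_ : List (String × List (List (String × String)))) :
    Option String × Option String × Option String :=
  let messages := (PySem.Dict.mk example_).getD "messages" []
  pvGoB messages.reverse false none false none false none

-- ===== PRECONDITION & SPEC =====
def Spec_parse_sft_example (example_ : List (String × List (List (String × String)))) (out : Option String × Option String × Option String) : Prop := out = parse_sft_example_alt example_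
instance (example_ : List (String × List (List (String × String)))) (out : Option String × Option String × Option String) : Decidable (Spec_parse_sft_example example_ out) := by unfold Spec_parse_sft_example; infer_instance

-- ===== CLAIM (what is proved, stated in full; the proofs are below) =====
def Claim_equal_parse_sft_example : Prop := ∀ (example_ : List (String × List (List (String × String)))), Dom_parse_sft_example example_ → Spec_parse_sft_example example_ (parse_sft_example example_)

-- ===== LEMMAS AND PROOFS =====

-- content of the first message in l whose role is r (none if there is none)
def pvFirst (r : String) (l : List (List (String × String))) : Option String :=
  l.findSome? (fun m =>
    if (PySem.Dict.mk m).get? "role" == some r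
    then some ((PySem.Dict.mk m).getD "content" "") else none)

theorem pvFirst_nil (r : String) : pvFirst r [] = none := rfl

theorem pvFirst_cons (r : String) (m : List (String × String))
    (t : List (List (String × String))) :
    pvFirst r (m :: t) =
      if (PySem.Dict.mk m).get? "role" == some r
      then some ((PySem.Dict.mk m).getD "content" "") else pvFirst r t := by
  simp [pvFirst, List.findSome?_cons]
  split <;> simp_all

theorem pvFirst_append (r : String) (l₁ l₂ : List (List (String × String))) :
    pvFirst r (l₁ ++ l₂) = (pvFirst r l₁).or (pvFirst r l₂) := by
  induction l₁ with
  | nil => simp [pvFirst_nil]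
  | cons m t ih => rw [List.cons_append, pvFirst_cons, pvFirst_cons, ih]; split <;> simp

-- characterisation of A's fold
theorem pvFoldA_char (l : List (List (String × String))) :
    ∀ s u a : Option String,
      l.foldl pvStepA (s, u, a) =
        ((pvFirst "system" l.reverse).or s, (pvFirst "user" l.reverse).or u,
         (pvFirst "assistant" l.reverse).or a) := by
  induction l with
  | nil => intro s u a; simp [pvFirst_nil]
  | cons m t ih =>
    intro s u a
    have hrev : (m :: t).reverse = t.reverse ++ [m] := by simp
    rw [List.foldl_cons]
    have hstep := ih (pvStepA (s, u, a) m).1 (pvStepA (s, u, a) m).2.1 (pvStepA (s, u, a) m).2.2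
    simp only [hrev, pvFirst_append, Option.or_assoc]
    rw [show pvStepA (s, u, a) m = ((pvStepA (s, u, a) m).1, (pvStepA (s, u, a) m).2.1,
      (pvStepA (s, u, a) m).2.2) from rfl, hstep]
    by_cases h1 : (PySem.Dict.mk m).get? "role" == some "system" <;>
      by_cases h2 : (PySem.Dict.mk m).get? "role" == some "user" <;>
      by_cases h3 : (PySem.Dict.mk m).get? "role" == some "assistant" <;>
      simp_all [pvStepA, pvFirst_cons, pvFirst_nil]

-- characterisation of B's reverse scan with flags
theorem pvGoB_char (l : List (List (String × String))) :
    ∀ (fs : Bool) (s : Option String) (fu : Bool) (u : Option String)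
      (fa : Bool) (a : Option String),
      pvGoB l fs s fu u fa a =
        ((if fs then s else (pvFirst "system" l).or s),
         (if fu then u else (pvFirst "user" l).or u),
         (if fa then a else (pvFirst "assistant" l).or a)) := by
  induction l with
  | nil => intro fs s fu u fa a; simp [pvGoB, pvFirst_nil]
  | cons m t ih =>
    intro fs s fu u fa a
    by_cases h1 : ((PySem.Dict.mk m).get? "role" == some "system" && !fs) = true <;>
      by_cases h2 : ((PySem.Dict.mk m).get? "role" == some "user" && !fu) = true <;>
      by_cases h3 : ((PySem.Dict.mk m).get? "role" == some "assistant" && !fa) = true <;>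
      simp only [pvGoB, h1, h2, h3, if_true] <;>
      · simp only [Bool.and_eq_true, Bool.not_eq_true'] at h1 h2 h3 ⊢
        cases fs <;> cases fu <;> cases fa <;> simp_all [ih, pvFirst_cons]

-- ===== VERDICT (by name: the statement is the Claim_ definition above) =====
theorem parse_sft_example_spec : Claim_equal_parse_sft_example := by
  intro ex _
  unfold Spec_parse_sft_example parse_sft_example parse_sft_example_alt
  rw [pvFoldA_char, pvGoB_char]
  simp
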